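-- pv_equiv track=rewrite | github.com/hymm/splat-stats-glicko2 | RankingFunctions.py | SeedingFromPools
-- ===== SOURCE A (Python) =====
-- def SeedingFromPools(PoolQualifiers):
--     """Returns the persons in PoolQualifiers sorted by seeding as determined by their place in the pool.
-- PoolQualifiers: A list of lists of qualifiers from pools, where the sublists are in order from strongest
-- to weakest pool, and each sublist is ordered from top to bottom qualifier."""
--     SeedList = []
--     for i in range(max([len(PoolQualifiers[j]) for j in range(len(PoolQualifiers))])):
--         if (i%2 == 0) ^ (i > 1):
--             for Sublist in PoolQualifiers:
--                 if i < len(Sublist):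
--                     SeedList.append(Sublist[i])
--         else:
--             for Sublist in PoolQualifiers[::-1]:
--                 if i < len(Sublist):
--                     SeedList.append(Sublist[i])
--     return SeedList
-- ===== SOURCE B (Python) =====
-- def SeedingFromPools(PoolQualifiers):
--     """Returns the persons in PoolQualifiers sorted by seeding as determined by
--     their place in the pool.  Transpose-based re-implementation: one pass over the
--     pools builds per-rank rows, then each row is emitted forward or reversed."""
--     n = max(len(p) for p in PoolQualifiers)
--     rows = [[] for _ in range(n)]
--     for p in PoolQualifiers:
--         for i, x in enumerate(p):
--             rows[i].append(x)
--     SeedList = []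
--     for i, row in enumerate(rows):
--         SeedList.extend(row if (i % 2 == 0) ^ (i > 1) else row[::-1])
--     return SeedList
-- ===== Notes on version B (the rewrite author's own statement) =====
-- stated objective: alternative
-- what changed: Replaces A's rank-major traversal (for each rank, scan every pool and build a reversed copy of the whole pool list on odd ranks) by a single pool-major pass that transposes the ragged pool lists into per-rank rows, then emits each row forward or reversed.
import Mathlib
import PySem

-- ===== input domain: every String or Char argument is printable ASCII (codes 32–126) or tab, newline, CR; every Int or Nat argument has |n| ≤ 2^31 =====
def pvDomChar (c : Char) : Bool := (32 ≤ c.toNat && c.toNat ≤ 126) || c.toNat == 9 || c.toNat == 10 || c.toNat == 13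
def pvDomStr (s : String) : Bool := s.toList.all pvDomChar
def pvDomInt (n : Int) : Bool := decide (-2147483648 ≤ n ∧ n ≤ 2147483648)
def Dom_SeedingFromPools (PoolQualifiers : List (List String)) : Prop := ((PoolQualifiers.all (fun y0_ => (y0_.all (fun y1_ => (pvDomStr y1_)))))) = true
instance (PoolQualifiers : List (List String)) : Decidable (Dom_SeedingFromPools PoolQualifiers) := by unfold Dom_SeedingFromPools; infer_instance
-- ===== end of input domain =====

-- B replaces A's rank-major scans over the pool lists by a one-pass transpose into
-- per-rank rows that are then emitted forward or reversed (objective: alternative).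


-- ===== PORT A =====
def SeedingFromPools (PoolQualifiers : List (List String)) : List String :=
  match PySem.List.max?
      ((PySem.List.pyRange 0 (PoolQualifiers.length : Int) 1).map
        (fun j => ((PySem.List.pyGetD PoolQualifiers j []).length : Int))) (fun x => x) with
  | none => []  -- max([]) raises ValueError in Python; excluded by Pre_
  | some n =>
    (PySem.List.pyRange 0 n 1).foldl (fun SeedList i =>
      if (PySem.Int.mod i 2 == 0).xor (decide (i > 1)) then
        PoolQualifiers.foldl (fun SeedList Sublist =>
          if i < (Sublist.length : Int) then SeedList ++ [PySem.List.pyGetD Sublist i ""]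
          else SeedList) SeedList
      else
        ((PySem.List.slice? PoolQualifiers none none (-1)).getD []).foldl
          (fun SeedList Sublist =>
            if i < (Sublist.length : Int) then SeedList ++ [PySem.List.pyGetD Sublist i ""]
            else SeedList) SeedList) []

-- ===== PORT B =====
def SeedingFromPools_alt (PoolQualifiers : List (List String)) : List String :=
  match PySem.List.max? (PoolQualifiers.map (fun p => (p.length : Int))) (fun x => x) with
  | none => []  -- max of an empty generator raises ValueError in Python; excluded by Pre_
  | some n =>
    let rows0 : List (List String) := (PySem.List.pyRange 0 n 1).map (fun _ => [])
    let rows := PoolQualifiers.foldl (fun rows p =>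
      (PySem.List.enumerate p 0).foldl
        (fun rows ix => rows.modify ix.1.toNat (fun r => r ++ [ix.2])) rows) rows0
    (PySem.List.enumerate rows 0).foldl (fun SeedList ir =>
      SeedList ++ (if (PySem.Int.mod ir.1 2 == 0).xor (decide (ir.1 > 1)) then ir.2
                   else (PySem.List.slice? ir.2 none none (-1)).getD [])) []

-- ===== PRECONDITION & SPEC =====
-- Pre_ excludes only the empty outer list, on which both A and B raise ValueError (max of an empty sequence).
def Pre_SeedingFromPools (PoolQualifiers : List (List String)) : Prop := PoolQualifiers ≠ []
instance (PoolQualifiers : List (List String)) : Decidable (Pre_SeedingFromPools PoolQualifiers) := by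
  unfold Pre_SeedingFromPools; infer_instance
def pvWitness_SeedingFromPools : List (List String) := [["a", "b"], ["c"]]
def Spec_SeedingFromPools (PoolQualifiers : List (List String)) (out : List String) : Prop := out = SeedingFromPools_alt PoolQualifiers
instance (PoolQualifiers : List (List String)) (out : List String) : Decidable (Spec_SeedingFromPools PoolQualifiers out) := by unfold Spec_SeedingFromPools; infer_instance

-- ===== CLAIM (what is proved, stated in full; the proofs are below) =====
def Claim_equal_SeedingFromPools : Prop := ∀ (PoolQualifiers : List (List String)), Dom_SeedingFromPools PoolQualifiers → Pre_SeedingFromPools PoolQualifiers → Spec_SeedingFromPools PoolQualifiers (SeedingFromPools PoolQualifiers)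

-- ===== LEMMAS AND PROOFS =====

-- the i-th rank row: the i-th qualifier of each pool, pools in order
def pvRow (pq : List (List String)) (j : Nat) : List String :=
  pq.filterMap (fun p => p[j]?)

def pvCond (i : Int) : Bool := (PySem.Int.mod i 2 == 0).xor (decide (i > 1))

-- A's inner pool scan appends exactly the rank-i row
theorem innerA_eq (i : Int) (hi : 0 ≤ i) (pq : List (List String)) (acc : List String) :
    pq.foldl (fun acc s =>
      if i < (s.length : Int) then acc ++ [PySem.List.pyGetD s i ""] else acc) acc
    = acc ++ pvRow pq i.toNat := by
  induction pq generalizing acc with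
  | nil => simp [pvRow]
  | cons p ps ih =>
    simp only [List.foldl_cons, pvRow, List.filterMap_cons] at *
    by_cases h : i < (p.length : Int)
    · have hg : p[i.toNat]? = some (PySem.List.pyGetD p i "") := by
        rw [PySem.List.pyGetD_eq_getElem p "" hi h, List.getElem?_eq_getElem (by omega)]
      rw [if_pos h, ih, hg]; simp
    · have hg : p[i.toNat]? = none := by
        apply List.getElem?_eq_none; omega
      rw [if_neg h, ih, hg]

-- B's transpose step: effect of appending one pool into the rows, seen through `[j]?`
theorem innerB_get? (p : List String) (s : Nat) (R : List (List String)) (j : Nat) :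
    (((PySem.List.enumerate p (s : Int)).foldl
        (fun rows ix => rows.modify ix.1.toNat (fun r => r ++ [ix.2])) R))[j]?
      = if j < s then R[j]?
        else (R[j]?).map (fun r => r ++ (p[j - s]?).toList) := by
  induction p generalizing s R with
  | nil =>
    simp only [PySem.List.enumerate_nil, List.foldl_nil]
    split
    · rfl
    · cases R[j]? <;> simp
  | cons x xs ih =>
    rw [PySem.List.enumerate_cons]
    simp only [List.foldl_cons]
    have hs : ((s : Int) + 1) = ((s + 1 : Nat) : Int) := by push_cast; ring
    rw [hs, ih]
    rcases lt_trichotomy j s with h | h | h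
    · rw [if_pos (by omega : j < s + 1), if_pos h, List.getElem?_modify]
      simp only [Int.toNat_natCast]
      cases R[j]? <;> simp [show ¬ s = j by omega]
    · subst h
      rw [if_pos (by omega : j < j + 1), if_neg (by omega), List.getElem?_modify]
      simp only [Int.toNat_natCast]
      cases R[j]? <;> simp
    · rw [if_neg (by omega : ¬ j < s + 1), if_neg (by omega), List.getElem?_modify]
      simp only [Int.toNat_natCast]
      have h2 : j - s = (j - (s + 1)) + 1 := by omega
      cases R[j]? <;> simp [show ¬ s = j by omega, h2]

-- B's whole transpose, seen through `[j]?`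
theorem foldB_get? (pq : List (List String)) (R : List (List String)) (j : Nat) :
    ((pq.foldl (fun rows p =>
        (PySem.List.enumerate p 0).foldl
          (fun rows ix => rows.modify ix.1.toNat (fun r => r ++ [ix.2])) rows) R))[j]?
      = (R[j]?).map (fun r => r ++ pvRow pq j) := by
  induction pq generalizing R with
  | nil => simp [pvRow]
  | cons p ps ih =>
    simp only [List.foldl_cons]
    rw [ih]
    rw [show ((0 : Int)) = ((0 : Nat) : Int) from rfl, innerB_get? p 0 R j,
      if_neg (by omega)]
    simp only [Nat.sub_zero]
    cases R[j]? <;> cases hp : p[j]? <;>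
      simp [pvRow, hp, List.append_assoc]

-- enumerate of a mapped range' is the range' of pairs
theorem enum_range'_map {β : Type} (m s : Nat) (f : Nat → β) :
    PySem.List.enumerate ((List.range' s m).map f) (s : Int)
      = (List.range' s m).map (fun k : Nat => ((k : Int), f k)) := by
  induction m generalizing s with
  | zero => simp [PySem.List.enumerate_nil]
  | succ m ih =>
    rw [List.range'_succ]
    simp only [List.map_cons]
    rw [PySem.List.enumerate_cons]
    have hs : ((s : Int) + 1) = ((s + 1 : Nat) : Int) := by push_cast; ring
    rw [hs, ih]

theorem seeding_eq (pq : List (List String)) :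
    SeedingFromPools pq = SeedingFromPools_alt pq := by
  unfold SeedingFromPools SeedingFromPools_alt
  have hlists :
      (PySem.List.pyRange 0 (pq.length : Int) 1).map
        (fun j => ((PySem.List.pyGetD pq j []).length : Int))
      = pq.map (fun p => (p.length : Int)) := by
    calc (PySem.List.pyRange 0 (pq.length : Int) 1).map
          (fun j => ((PySem.List.pyGetD pq j []).length : Int))
        = ((PySem.List.pyRange 0 (pq.length : Int) 1).map
            (fun j => PySem.List.pyGetD pq j [])).map (fun p => (p.length : Int)) := by
          rw [List.map_map]; rfl
      _ = pq.map (fun p => (p.length : Int)) := by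
          rw [PySem.List.map_pyGetD_pyRange_zero']
  rw [hlists]
  cases hmax : PySem.List.max? (pq.map (fun p => (p.length : Int))) (fun x => x) with
  | none => rfl
  | some n =>
    dsimp only
    have hn : 0 ≤ n := by
      have hmem := PySem.List.max?_mem hmax
      obtain ⟨p, _, hp⟩ := List.mem_map.mp hmem
      omega
    -- A's side: flatMap of directed rows over the range
    have hA : (PySem.List.pyRange 0 n 1).foldl (fun SeedList i =>
        if (PySem.Int.mod i 2 == 0).xor (decide (i > 1)) then
          pq.foldl (fun SeedList Sublist =>
            if i < (Sublist.length : Int) then SeedList ++ [PySem.List.pyGetD Sublist i ""]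
            else SeedList) SeedList
        else
          ((PySem.List.slice? pq none none (-1)).getD []).foldl
            (fun SeedList Sublist =>
              if i < (Sublist.length : Int) then SeedList ++ [PySem.List.pyGetD Sublist i ""]
              else SeedList) SeedList) []
      = (PySem.List.pyRange 0 n 1).flatMap
          (fun i => if pvCond i then pvRow pq i.toNat else (pvRow pq i.toNat).reverse) := by
      rw [PySem.List.foldl_congr_mem (PySem.List.pyRange 0 n 1) _
        (fun SeedList i => SeedList ++
          (if pvCond i then pvRow pq i.toNat else (pvRow pq i.toNat).reverse)) []
        (by
          intro acc i hi
          have h0i : 0 ≤ i := ((PySem.List.mem_pyRange_one).mp hi).1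
          cases hcb : (PySem.Int.mod i 2 == 0).xor (decide (i > 1))
          · simp only [pvCond, hcb, Bool.false_eq_true, if_false]
            rw [PySem.List.slice?_none_none_neg_one, Option.getD_some,
              innerA_eq i h0i pq.reverse]
            simp only [pvRow]
            rw [List.filterMap_reverse]
          · simp only [pvCond, hcb, if_true]
            exact innerA_eq i h0i pq acc)]
      rw [PySem.List.foldl_append_eq_flatMap, List.nil_append]
    rw [hA]
    -- B's rows equal the list of the rank rows
    have hrows : (pq.foldl (fun rows p =>
        (PySem.List.enumerate p 0).foldl
          (fun rows ix => rows.modify ix.1.toNat (fun r => r ++ [ix.2])) rows)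
        ((PySem.List.pyRange 0 n 1).map (fun _ => ([] : List String))))
      = (List.range n.toNat).map (pvRow pq) := by
      apply List.ext_getElem?
      intro j
      rw [foldB_get? pq _ j, List.getElem?_map, List.getElem?_map]
      by_cases hj : j < n.toNat
      · rw [List.getElem?_eq_getElem
            (by rw [PySem.List.length_pyRange_one]; omega : j < (PySem.List.pyRange 0 n 1).length),
          List.getElem?_eq_getElem (by simpa using hj)]
        simp
      · rw [List.getElem?_eq_none (by rw [PySem.List.length_pyRange_one]; omega),
          List.getElem?_eq_none (by simpa using hj)]
        rfl
    rw [hrows]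
    -- B's emission loop as flatMap over the enumerated rows
    have henum : PySem.List.enumerate ((List.range n.toNat).map (pvRow pq)) 0
        = (List.range n.toNat).map (fun k : Nat => ((k : Int), pvRow pq k)) := by
      have := enum_range'_map n.toNat 0 (pvRow pq)
      simpa [List.range_eq_range'] using this
    rw [henum,
      PySem.List.foldl_append_eq_flatMap
        (fun ir : Int × List String =>
          if (PySem.Int.mod ir.1 2 == 0).xor (decide (ir.1 > 1)) then ir.2
          else (PySem.List.slice? ir.2 none none (-1)).getD []) _ [],
      List.nil_append,
      show PySem.List.pyRange 0 n 1 = (List.range n.toNat).map (fun k : Nat => ((k : Nat) : Int)) from by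
        rw [← PySem.List.pyRange_zero_nat, Int.toNat_of_nonneg hn],
      List.flatMap_map, List.flatMap_map]
    exact congrArg (fun f => List.flatMap f (List.range n.toNat)) (funext fun k => by
      simp [pvCond, PySem.List.slice?_none_none_neg_one])

-- ===== VERDICT (by name: the statement is the Claim_ definition above) =====
theorem SeedingFromPools_spec : Claim_equal_SeedingFromPools := by
  intro pq _ _
  unfold Spec_SeedingFromPools
  exact seeding_eq pq
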